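-- pv_equiv track=rewrite | github.com/NarekR/BigData | DataCollectH4.py | count_comments_by_category
-- ===== SOURCE A (Python) =====
-- def count_comments_by_category(comments):
--     category_count = {}
--
--     for comment in comments:
--         # Используем первое слово в комментарии как категорию
--         words = comment.split()
--         if words:
--             category = words[0]
--             if category in category_count:
--                 category_count[category].append(comment)
--             else:
--                 category_count[category] = [comment]
--
--     return category_count
-- ===== SOURCE B (Python) =====
-- def count_comments_by_category(comments):
--     # Pair each comment that has at least one word with its first word,
--     # compute the distinct first words in order of first appearance,
--     # then build each group by filtering the paired list per key.
--     keyed = [(c.split()[0], c) for c in comments if c.split()]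
--     keys = []
--     for k, _ in keyed:
--         if k not in keys:
--             keys.append(k)
--     return {k: [c for k2, c in keyed if k2 == k] for k in keys}
-- ===== Notes on version B (the rewrite author's own statement) =====
-- stated objective: alternative
-- what changed: Replaces A's single-pass dict accumulation (lookup-then-append/insert per comment) with a key/comment pairing pass, an ordered dedup of first words, and a per-key filter comprehension building each group.
import Mathlib
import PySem

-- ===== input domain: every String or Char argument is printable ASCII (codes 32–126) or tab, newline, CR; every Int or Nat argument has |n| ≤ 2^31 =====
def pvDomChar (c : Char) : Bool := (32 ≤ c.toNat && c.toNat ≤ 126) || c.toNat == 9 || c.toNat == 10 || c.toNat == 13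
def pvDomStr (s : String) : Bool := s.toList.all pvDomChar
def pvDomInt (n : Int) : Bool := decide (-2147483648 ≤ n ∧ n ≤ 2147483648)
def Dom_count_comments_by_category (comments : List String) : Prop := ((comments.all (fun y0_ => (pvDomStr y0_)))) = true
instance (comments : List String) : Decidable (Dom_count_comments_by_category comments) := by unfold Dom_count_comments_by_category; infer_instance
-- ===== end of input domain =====

-- B groups comments via a pairing pass, an ordered dedup of first words, and a per-key filter,
-- instead of A's single-pass dict accumulation; objective: alternative (same result, different algorithm).

-- ===== PORT A =====
-- A's loop over comments accumulating a dict keyed by the first word of each comment.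
def count_comments_by_category (comments : List String) : List (String × List String) :=
  (comments.foldl (fun d comment =>
    match PySem.Str.split₀ comment with
    | [] => d
    | category :: _ =>
      if d.contains category then d.modify category [] (fun l => l ++ [comment])
      else d.insert category [comment]) PySem.Dict.empty).items

-- ===== PORT B =====
-- keyed = [(c.split()[0], c) for c in comments if c.split()]; c.split()[0] on the kept (non-empty-split)
-- comments is the head of the split, ported as headD "".
def pvKeyedOf (comments : List String) : List (String × String) :=
  (comments.filter (fun c => !(PySem.Str.split₀ c).isEmpty)).map
    (fun c => ((PySem.Str.split₀ c).headD "", c))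

def count_comments_by_category_alt (comments : List String) : List (String × List String) :=
  let keyed := pvKeyedOf comments
  let keys := keyed.foldl (fun ks p => if p.1 ∈ ks then ks else ks ++ [p.1]) []
  -- the dict comprehension {k: [...] for k in keys} over the distinct keys is exactly this association list
  keys.map (fun k => (k, (keyed.filter (fun p => p.1 == k)).map (fun p => p.2)))

-- ===== PRECONDITION & SPEC =====
def Spec_count_comments_by_category (comments : List String) (out : List (String × List String)) : Prop := out = count_comments_by_category_alt comments
instance (comments : List String) (out : List (String × List String)) : Decidable (Spec_count_comments_by_category comments out) := by unfold Spec_count_comments_by_category; infer_instance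

-- ===== CLAIM (what is proved, stated in full; the proofs are below) =====
def Claim_equal_count_comments_by_category : Prop := ∀ (comments : List String), Dom_count_comments_by_category comments → Spec_count_comments_by_category comments (count_comments_by_category comments)

-- ===== LEMMAS AND PROOFS =====

-- A's per-comment step (branching on containment) equals an unconditional modify-append.
theorem pv_stepA_eq_modify (d : PySem.Dict String (List String)) (w c : String) :
    (if d.contains w then d.modify w [] (fun l => l ++ [c]) else d.insert w [c])
      = d.modify w [] (fun l => l ++ [c]) := by
  by_cases h : d.contains w = true
  · simp [h]
  · have h' : d.contains w = false := by simpa using h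
    simp [h', PySem.Dict.modify, PySem.Dict.getD_of_not_contains]

-- A's fold over comments equals the modify-append fold over the keyed pairs.
theorem pv_foldA_eq (l : List String) (d : PySem.Dict String (List String)) :
    l.foldl (fun d comment =>
      match PySem.Str.split₀ comment with
      | [] => d
      | category :: _ =>
        if d.contains category then d.modify category [] (fun l => l ++ [comment])
        else d.insert category [comment]) d
    = (pvKeyedOf l).foldl (fun d p => d.modify p.1 [] (fun x => x ++ [p.2])) d := by
  induction l generalizing d with
  | nil => simp [pvKeyedOf]
  | cons c cs ih =>
    cases hc : PySem.Str.split₀ c with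
    | nil => simp [pvKeyedOf, hc, ih]
    | cons w ws =>
      simp only [List.foldl_cons, hc]
      rw [pv_stepA_eq_modify, ih]
      simp [pvKeyedOf, hc]

-- B's ordered-dedup loop equals PySem.Set.update.
theorem pv_keys_eq (l : List (String × String)) (ks : List String) :
    l.foldl (fun ks p => if p.1 ∈ ks then ks else ks ++ [p.1]) ks
      = PySem.Set.update ks (l.map Prod.fst) := by
  induction l generalizing ks with
  | nil => simp [PySem.Set.update]
  | cons p ps ih =>
    simp only [List.foldl_cons, List.map_cons, PySem.Set.update] at *
    rw [ih]
    by_cases h : p.1 ∈ ks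
    · simp [PySem.Set.add, h]
    · simp [PySem.Set.add, h]

theorem count_comments_by_category_eq (comments : List String) :
    count_comments_by_category comments = count_comments_by_category_alt comments := by
  unfold count_comments_by_category count_comments_by_category_alt
  rw [pv_foldA_eq]
  simp only [pv_keys_eq]
  have hnd : ((pvKeyedOf comments).foldl
      (fun d p => d.modify p.1 [] (fun x => x ++ [p.2])) PySem.Dict.empty).keys.Nodup := by
    exact PySem.Dict.nodup_keys_foldl_modify_key (pvKeyedOf comments) Prod.fst []
      (fun _ p => fun x => x ++ [p.2]) PySem.Dict.empty (by simp)
  rw [PySem.Dict.items_eq_map_keys _ hnd []]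
  rw [PySem.Dict.keys_foldl_modify_key (pvKeyedOf comments) Prod.fst []
      (fun _ p => fun x => x ++ [p.2]) PySem.Dict.empty]
  refine List.map_congr_left ?_
  intro k hk
  rw [PySem.Dict.getD_foldl_modify_append]
  simp

-- ===== VERDICT (by name: the statement is the Claim_ definition above) =====
theorem count_comments_by_category_spec : Claim_equal_count_comments_by_category := by
  intro comments _
  unfold Spec_count_comments_by_category
  exact count_comments_by_category_eq comments
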